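-- pv_equiv track=rewrite | github.com/dommisse/CodingAssignments | TwitterFeedSimulation/TwitterFeedProcessingMethods.py | tplParseUsers
-- ===== SOURCE A (Python) =====
-- def tplParseUsers(acUserContent: str):
--     """ Method to parse user text
--
--         Parameters:
--             acUserContent (str): User content as in user.txt
--
--         Returns:
--             tplUsers(dctUserRelations, lstAllUsers)
--             dctUserRelations (dictionary): {user(str): user and all users current user follows (list of strings)}
--                 example: {'Ward': ['Ward', 'Martin', 'Alan']}
--             lstAllUsers (list): [all users alphabetically sorted (str)]
--
--     """
--     dctUserRelations = {}
--     lstAllUsers = []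
--     tplUsers = (dctUserRelations, lstAllUsers)
--
--     # If User Content is empty
--     if (not acUserContent):
--         return(tplUsers)
--
--     # Go through each line in text file
--     for acLine in acUserContent.splitlines():
--         acUserLine = acLine.replace(',', '').split()
--         acUserLine.remove('follows')
--
--         # Create dictionary of users and who they follow : i.e {user : all users current user follows including current user}
--         acUser = acUserLine[0]
--         acUserAndRelations = acUserLine[:]
--         dctUserRelations[(acUser)] = acUserAndRelations
--
--         # Create list of all users
--         lstAllUsers.append(acUserLine)
--
--     # Flatten the List Structure into one List of All Users
--     lstAllUsers = [item for sublist in lstAllUsers for item in sublist]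
--
--     # Remove Duplicate Users
--     lstAllUsers = list(dict.fromkeys(lstAllUsers))
--
--     # Sort List of Users into alphabetical order
--     lstAllUsers = sorted(lstAllUsers)
--
--     tplUsers = (dctUserRelations, lstAllUsers)
--
--     return(tplUsers)
-- ===== SOURCE B (Python) =====
-- def _uniqueSorted(tokens):
--     """Collapse adjacent duplicates in an already-sorted list (sort-unique scan)."""
--     if len(tokens) < 2:
--         return tokens[:]
--     if tokens[0] == tokens[1]:
--         return _uniqueSorted(tokens[1:])
--     return [tokens[0]] + _uniqueSorted(tokens[1:])
--
--
-- def tplParseUsers(acUserContent: str):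
--     """Parse user text into ({user: [user] + followed users}, sorted list of all users)."""
--     if not acUserContent:
--         return ({}, [])
--
--     rows = [line.replace(',', '').split() for line in acUserContent.splitlines()]
--     for row in rows:
--         row.remove('follows')
--
--     dctUserRelations = {row[0]: row[:] for row in rows}
--
--     # sort ALL tokens first, then deduplicate in one adjacent-compare scan
--     tokens = sorted(t for row in rows for t in row)
--     return (dctUserRelations, _uniqueSorted(tokens))
-- ===== Notes on version B (the rewrite author's own statement) =====
-- stated objective: alternative
-- what changed: B stages the work as comprehensions over a list of token rows and replaces A's dedup-in-first-occurrence-order-then-sort with the sort-then-adjacent-unique algorithm (sort all tokens once, then a recursive scan collapsing equal neighbours).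
import Mathlib
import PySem

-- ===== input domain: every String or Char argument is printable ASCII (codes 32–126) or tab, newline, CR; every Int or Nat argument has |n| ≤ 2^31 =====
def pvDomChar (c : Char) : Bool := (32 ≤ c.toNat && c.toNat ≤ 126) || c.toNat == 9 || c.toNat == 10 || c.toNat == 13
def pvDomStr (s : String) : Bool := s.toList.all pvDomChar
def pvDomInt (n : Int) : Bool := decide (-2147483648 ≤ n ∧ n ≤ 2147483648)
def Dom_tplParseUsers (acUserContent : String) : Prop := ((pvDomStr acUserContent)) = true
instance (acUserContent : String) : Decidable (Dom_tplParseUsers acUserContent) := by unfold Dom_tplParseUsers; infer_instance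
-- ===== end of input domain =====

-- B stages the parse as comprehensions over token rows and deduplicates by sort-then-adjacent-unique
-- instead of A's flatten + first-occurrence dedup + sort; objective: alternative.

-- ===== PORT A =====
-- tokens of a line: acLine.replace(',', '').split() with 'follows' removed
-- (total form of List.remove?; exact under Pre_, where 'follows' is in the list)
def pvToks (acLine : String) : List String :=
  (PySem.List.remove? (PySem.Str.split₀ (PySem.Str.replace acLine "," "")) "follows").getD []

def tplParseUsers (acUserContent : String) : (List (String × List String)) × List String :=
  if acUserContent = "" then ([], [])
  else
    let st := (PySem.Str.splitlines acUserContent).foldl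
      (fun (st : PySem.Dict String (List String) × List (List String)) acLine =>
        let acUserLine := pvToks acLine
        -- acUser = acUserLine[0] (total form of pyGet?; exact under Pre_, where the list is nonempty)
        let acUser := (PySem.List.pyGet? acUserLine 0).getD ""
        let acUserAndRelations := acUserLine  -- acUserLine[:] (copying is identity here)
        (st.1.insert acUser acUserAndRelations, st.2 ++ [acUserLine]))
      (PySem.Dict.empty, [])
    -- flatten, dedup via dict.fromkeys, sort
    (st.1.items, PySem.List.sorted (PySem.List.dedup (st.2.flatMap id)) (fun x => x) false)

-- ===== PORT B =====
-- _uniqueSorted: recursive adjacent-duplicate collapse on an already-sorted list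
def pvUniq : List String → List String
  | [] => []
  | [a] => [a]
  | a :: b :: t => if a = b then pvUniq (b :: t) else a :: pvUniq (b :: t)

def tplParseUsers_alt (acUserContent : String) : (List (String × List String)) × List String :=
  if acUserContent = "" then ([], [])
  else
    -- rows = [line.replace(',', '').split() for line in splitlines()], then row.remove('follows') on each
    let rows := ((PySem.Str.splitlines acUserContent).map
        (fun line => PySem.Str.split₀ (PySem.Str.replace line "," ""))).map
        (fun row => (PySem.List.remove? row "follows").getD [])
    -- dict comprehension {row[0]: row[:] for row in rows}
    let dct := rows.foldl
      (fun (d : PySem.Dict String (List String)) row =>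
        d.insert ((PySem.List.pyGet? row 0).getD "") row)
      PySem.Dict.empty
    -- tokens = sorted(t for row in rows for t in row)
    let tokens := PySem.List.sorted (rows.flatMap id) (fun x => x) false
    (dct.items, pvUniq tokens)

-- ===== PRECONDITION & SPEC =====
-- Pre_ excludes exactly the inputs where A raises: a nonempty input containing a line whose
-- token list lacks 'follows' (ValueError from .remove) or consists of 'follows' alone (IndexError).
def Pre_tplParseUsers (acUserContent : String) : Prop :=
  acUserContent = "" ∨
    ∀ acLine ∈ PySem.Str.splitlines acUserContent,
      "follows" ∈ PySem.Str.split₀ (PySem.Str.replace acLine "," "") ∧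
      2 ≤ (PySem.Str.split₀ (PySem.Str.replace acLine "," "")).length
instance (acUserContent : String) : Decidable (Pre_tplParseUsers acUserContent) := by
  unfold Pre_tplParseUsers; infer_instance

def pvWitness_tplParseUsers : String := "Ward follows Alan, Martin\nAlan follows Martin"

def Spec_tplParseUsers (acUserContent : String) (out : (List (String × List String)) × List String) : Prop := out = tplParseUsers_alt acUserContent
instance (acUserContent : String) (out : (List (String × List String)) × List String) : Decidable (Spec_tplParseUsers acUserContent out) := by unfold Spec_tplParseUsers; infer_instance

-- ===== CLAIM (what is proved, stated in full; the proofs are below) =====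
def Claim_equal_tplParseUsers : Prop := ∀ (acUserContent : String), Dom_tplParseUsers acUserContent → Pre_tplParseUsers acUserContent → Spec_tplParseUsers acUserContent (tplParseUsers acUserContent)

-- ===== LEMMAS AND PROOFS =====

-- a fold whose two state components evolve independently splits into two folds
theorem pvFoldPair {α β γ : Type} (f : β → α → β) (g : γ → α → γ) :
    ∀ (l : List α) (b : β) (c : γ),
      l.foldl (fun st x => (f st.1 x, g st.2 x)) (b, c) = (l.foldl f b, l.foldl g c) := by
  intro l
  induction l with
  | nil => intro b c; rfl
  | cons x t ih => intro b c; simpa using ih (f b x) (g c x)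

-- A's appended list-of-lists is the map of pvToks
theorem pvFoldAppend (l : List String) :
    ∀ (acc : List (List String)),
      l.foldl (fun ls x => ls ++ [pvToks x]) acc = acc ++ l.map pvToks := by
  induction l with
  | nil => intro acc; simp
  | cons x t ih => intro acc; simp [ih]

-- pvUniq keeps exactly the members of its input
theorem pvUniq_mem (l : List String) (x : String) : x ∈ pvUniq l ↔ x ∈ l := by
  induction l using pvUniq.induct with
  | case1 => simp [pvUniq]
  | case2 a => simp [pvUniq]
  | case3 b t ih => simp [pvUniq, ih]
  | case4 a b t h ih => simp [pvUniq, h, ih]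

-- on a ≤-sorted list, collapsing adjacent duplicates yields a strictly increasing list
theorem pvUniq_pairwise_lt :
    ∀ (l : List String), l.Pairwise (· ≤ ·) → (pvUniq l).Pairwise (· < ·) := by
  intro l
  induction l using pvUniq.induct with
  | case1 => intro _; simp [pvUniq]
  | case2 a => intro _; simp [pvUniq]
  | case3 b t ih =>
    intro hp
    simp only [pvUniq]
    exact ih (hp.sublist (List.sublist_cons_self _ _))
  | case4 a b t h ih =>
    intro hp
    simp only [pvUniq, if_neg h]
    rcases List.pairwise_cons.mp hp with ⟨hab, hbt⟩
    refine List.pairwise_cons.mpr ⟨?_, ih hbt⟩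
    intro y hy
    rcases List.mem_cons.mp ((pvUniq_mem _ _).mp hy) with hyb | hyt
    · exact lt_of_le_of_ne (by simpa [hyb] using hab b (by simp)) (by simpa [hyb] using h)
    · have hab' : a < b :=
        lt_of_le_of_ne (hab b (by simp)) h
      have hby : b ≤ y := (List.pairwise_cons.mp hbt).1 y hyt
      exact lt_of_lt_of_le hab' hby

-- the core algorithmic fact: dedup-then-sort equals sort-then-adjacent-unique
theorem pvSortDedup (L : List String) :
    PySem.List.sorted (PySem.List.dedup L) (fun x => x) false
      = pvUniq (PySem.List.sorted L (fun x => x) false) := by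
  have hpw : (pvUniq (PySem.List.sorted L (fun x => x) false)).Pairwise (· < ·) :=
    pvUniq_pairwise_lt _ (by simpa using PySem.List.sorted_pairwise L (fun x => x))
  apply PySem.List.sorted_eq_of_perm_of_pairwise_lt
  · rw [List.perm_ext_iff_of_nodup (hpw.imp ne_of_lt) (PySem.List.nodup_dedup L)]
    intro a
    rw [pvUniq_mem, PySem.List.mem_sorted, PySem.List.mem_dedup]
  · exact hpw

set_option maxHeartbeats 1000000 in
theorem tplParseUsers_eq_alt (acUserContent : String) (_hpre : Pre_tplParseUsers acUserContent) :
    tplParseUsers acUserContent = tplParseUsers_alt acUserContent := by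
  unfold tplParseUsers tplParseUsers_alt
  by_cases h : acUserContent = ""
  · simp [h]
  · simp only [h, if_false, List.map_map]
    rw [pvFoldPair (fun (d : PySem.Dict String (List String)) acLine =>
          d.insert ((PySem.List.pyGet? (pvToks acLine) 0).getD "") (pvToks acLine))
        (fun (ls : List (List String)) acLine => ls ++ [pvToks acLine])]
    simp only [pvFoldAppend, List.nil_append]
    rw [show ((fun row => (PySem.List.remove? row "follows").getD []) ∘
          fun line => PySem.Str.split₀ (PySem.Str.replace line "," "")) = pvToks from rfl]
    rw [List.foldl_map]
    rw [pvSortDedup]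

-- ===== VERDICT (by name: the statement is the Claim_ definition above) =====
theorem tplParseUsers_spec : Claim_equal_tplParseUsers := by
  intro s _ hpre
  exact tplParseUsers_eq_alt s hpre
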